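-- pv_equiv track=rewrite | github.com/Kartik-Chaurasiya/Coding-Problems | array problems.py | find_nth_min
-- ===== SOURCE A (Python) =====
-- def find_nth_min(arr3, n_min):
--     for x in arr3:
--         count = 0
--         for y in arr3:
--             if x > y:
--                 count += 1
--         if count == n_min and arr3[len(arr3) - 1] == x:
--             return x
-- ===== SOURCE B (Python) =====
-- def find_nth_min(arr3, n_min):
--     if not arr3:
--         return None
--     v = arr3[-1]
--     r = sorted(arr3).index(v)
--     return v if r == n_min else None
-- ===== Notes on version B (the rewrite author's own statement) =====
-- stated objective: simpler
-- what changed: Replaces the quadratic nested rescanning loop with: take the last element, sort once, and use the first-occurrence index in the sorted list as the count of strictly smaller elements.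
import Mathlib
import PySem

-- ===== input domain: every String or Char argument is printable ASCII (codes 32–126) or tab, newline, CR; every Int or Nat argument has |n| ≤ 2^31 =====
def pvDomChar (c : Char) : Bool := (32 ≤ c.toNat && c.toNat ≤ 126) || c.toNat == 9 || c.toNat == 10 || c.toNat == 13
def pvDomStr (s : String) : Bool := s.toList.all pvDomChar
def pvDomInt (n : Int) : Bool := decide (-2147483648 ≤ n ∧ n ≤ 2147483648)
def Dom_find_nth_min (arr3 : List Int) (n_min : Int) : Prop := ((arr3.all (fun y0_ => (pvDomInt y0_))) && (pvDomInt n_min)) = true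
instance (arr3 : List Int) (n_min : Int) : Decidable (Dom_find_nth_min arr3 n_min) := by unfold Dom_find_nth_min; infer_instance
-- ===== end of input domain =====

-- B replaces A's quadratic nested rescanning with: last element, one sort, first-occurrence index = count of smaller elements (simpler).

-- ===== PORT A =====
-- the 'for x in arr3' loop: inner count pass, then the combined test; first hit returns
def fnmLoop (arr3 : List Int) (n_min : Int) : List Int → Option Int
  | [] => none
  | x :: rest =>
    let count := arr3.foldl (fun c y => if x > y then c + 1 else c) (0 : Int)
    if count = n_min ∧ PySem.List.pyGet? arr3 ((arr3.length : Int) - 1) = some x then some x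
    else fnmLoop arr3 n_min rest

def find_nth_min (arr3 : List Int) (n_min : Int) : Option Int :=
  fnmLoop arr3 n_min arr3

-- ===== PORT B =====
def find_nth_min_alt (arr3 : List Int) (n_min : Int) : Option Int :=
  if arr3 = [] then none
  else
    match PySem.List.pyGet? arr3 (-1) with
    | none => none
    | some v =>
      match PySem.List.index? (PySem.List.sorted arr3 (fun x => x) false) v with
      | some r => if (r : Int) = n_min then some v else none
      | none => none  -- unreachable: v ∈ arr3, so .index never raises

-- ===== PRECONDITION & SPEC =====
def Spec_find_nth_min (arr3 : List Int) (n_min : Int) (out : Option Int) : Prop := out = find_nth_min_alt arr3 n_min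
instance (arr3 : List Int) (n_min : Int) (out : Option Int) : Decidable (Spec_find_nth_min arr3 n_min out) := by unfold Spec_find_nth_min; infer_instance

-- ===== CLAIM (what is proved, stated in full; the proofs are below) =====
def Claim_equal_find_nth_min : Prop := ∀ (arr3 : List Int) (n_min : Int), Dom_find_nth_min arr3 n_min → Spec_find_nth_min arr3 n_min (find_nth_min arr3 n_min)

-- ===== LEMMAS AND PROOFS =====

-- last-element access, both spellings
theorem pyGet_last (arr3 : List Int) (h : arr3 ≠ []) :
    PySem.List.pyGet? arr3 ((arr3.length : Int) - 1) = some (arr3.getLast h) := by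
  have hlen : 0 < arr3.length := List.length_pos_of_ne_nil h
  have : ((arr3.length : Int) - 1) = ((arr3.length - 1 : Nat) : Int) := by omega
  rw [this, PySem.List.pyGet?_natCast]
  rw [← List.getLast?_eq_getElem?, List.getLast?_eq_some_getLast h]

theorem pyGet_neg_one (arr3 : List Int) (h : arr3 ≠ []) :
    PySem.List.pyGet? arr3 (-1) = some (arr3.getLast h) := by
  have hlen : 0 < arr3.length := List.length_pos_of_ne_nil h
  rw [PySem.List.pyGet?_neg_ofNat arr3 1 (by omega) (by omega)]
  rw [← List.getLast?_eq_getElem?, List.getLast?_eq_some_getLast h]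

-- first-occurrence index in a ≤-sorted list = number of strictly smaller elements
theorem index_sorted_eq_countP (s : List Int) (v : Int)
    (hp : s.Pairwise (fun a b => a ≤ b)) (hv : v ∈ s) :
    PySem.List.index? s v = some (s.countP (fun y => decide (y < v))) := by
  induction s with
  | nil => cases hv
  | cons x t ih =>
    rcases List.pairwise_cons.mp hp with ⟨hx, ht⟩
    by_cases hxv : x = v
    · subst hxv
      have hnone : ∀ y ∈ t, ¬ (y < x) := fun y hy => not_lt.mpr (hx y hy)
      have : t.countP (fun y => decide (y < x)) = 0 := by
        rw [List.countP_eq_zero]; intro y hy; simpa using hnone y hy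
      rw [PySem.List.index?_cons_self]
      simp [this]
    · have hvt : v ∈ t := by cases hv with
        | head => exact absurd rfl hxv
        | tail _ h => exact h
      have hxle : x ≤ v := hx v hvt
      have hxlt : x < v := lt_of_le_of_ne hxle hxv
      rw [PySem.List.index?_cons_of_ne t hxv, ih ht hvt]
      simp [hxlt]

-- A's loop, characterised (given the fixed last element v)
theorem fnmLoop_eq (arr3 : List Int) (n_min : Int) (v : Int)
    (hlast : PySem.List.pyGet? arr3 ((arr3.length : Int) - 1) = some v) :
    ∀ l : List Int, fnmLoop arr3 n_min l =
      if (∃ x ∈ l, x = v ∧ (arr3.countP (fun y => decide (y < x)) : Int) = n_min)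
      then some v else none := by
  intro l
  induction l with
  | nil => simp [fnmLoop]
  | cons x rest ih =>
    rw [fnmLoop]
    have hc : arr3.foldl (fun c y => if x > y then c + 1 else c) (0 : Int)
        = (arr3.countP (fun y => decide (y < x)) : Int) := by
      rw [PySem.List.foldl_ite_add_one]
      simp [GT.gt]
    by_cases hx : (arr3.countP (fun y => decide (y < x)) : Int) = n_min ∧ x = v
    · rw [if_pos ⟨by simp [hc, hx.1], by rw [hlast, hx.2]⟩]
      rw [if_pos ⟨x, List.mem_cons_self, hx.2, hx.1⟩, hx.2]
    · have hneg : ¬ ((arr3.foldl (fun c y => if x > y then c + 1 else c) (0 : Int)) = n_min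
          ∧ PySem.List.pyGet? arr3 ((arr3.length : Int) - 1) = some x) := by
        rw [hc, hlast]
        intro ⟨h1, h2⟩
        exact hx ⟨h1, (Option.some_inj.mp h2).symm⟩
      rw [if_neg hneg, ih]
      congr 1
      simp only [List.mem_cons, eq_iff_iff]
      constructor
      · rintro ⟨y, hy, hyv, hyc⟩; exact ⟨y, Or.inr hy, hyv, hyc⟩
      · rintro ⟨y, hy, hyv, hyc⟩
        rcases hy with rfl | hy
        · exact absurd ⟨hyc, hyv⟩ hx
        · exact ⟨y, hy, hyv, hyc⟩

-- ===== VERDICT (by name: the statement is the Claim_ definition above) =====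
theorem find_nth_min_spec : Claim_equal_find_nth_min := by
  intro arr3 n_min _
  unfold Spec_find_nth_min find_nth_min find_nth_min_alt
  by_cases h : arr3 = []
  · subst h; simp [fnmLoop]
  · set v := arr3.getLast h with hv
    rw [if_neg h, pyGet_neg_one arr3 h]
    dsimp only
    have hvmem : v ∈ arr3 := List.getLast_mem h
    have hsmem : v ∈ PySem.List.sorted arr3 (fun x => x) false :=
      (PySem.List.mem_sorted arr3 (fun x => x) false v).mpr hvmem
    have hsp : (PySem.List.sorted arr3 (fun x => x) false).Pairwise (fun a b => a ≤ b) := by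
      have := PySem.List.sorted_pairwise (xs := arr3) (key := fun x => x)
      simpa using this
    rw [index_sorted_eq_countP _ v hsp hsmem]
    have hperm : (PySem.List.sorted arr3 (fun x => x) false).Perm arr3 :=
      PySem.List.sorted_perm arr3 (fun x => x) false
    rw [hperm.countP_eq]
    dsimp only
    rw [fnmLoop_eq arr3 n_min v (pyGet_last arr3 h)]
    have hx : (∃ x ∈ arr3, x = v ∧ (arr3.countP (fun y => decide (y < x)) : Int) = n_min)
        ↔ (arr3.countP (fun y => decide (y < v)) : Int) = n_min := by
      constructor
      · rintro ⟨x, _, rfl, hc⟩; exact hc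
      · intro hc; exact ⟨v, hvmem, rfl, hc⟩
    by_cases hc : (arr3.countP (fun y => decide (y < v)) : Int) = n_min
    · rw [if_pos (hx.mpr hc), if_pos hc]
    · rw [if_neg (fun he => hc (hx.mp he)), if_neg hc]
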